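-- pv_equiv track=rewrite | github.com/Francode77/hair_removal_ham10000 | functions.py | reduce_points
-- ===== SOURCE A (Python) =====
-- def reduce_points(points):
--
--     filtered_points = []
--
--     # iterate through the points
--     for i in range(len(points)):
--         # assume that the current point is not next to any other point
--         is_next_to_another_point = False
--         # check if the current point is next to any of the previous points
--         for j in range(i):
--             if abs(points[i][0] - points[j][0]) <= 2 and abs(points[i][1] - points[j][1]) <= 2:
--                 is_next_to_another_point = True
--                 break
--         # add the current point to the filtered list if it's not next to any other point
--         if not is_next_to_another_point:
--             filtered_points.append(points[i])
--
--     # return the filtered points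
--     return filtered_points
-- ===== SOURCE B (Python) =====
-- def reduce_points(points):
--     filtered_points = []
--     seen = set()
--     for x, y in points:
--         if not any((x + dx, y + dy) in seen
--                    for dx in range(-2, 3) for dy in range(-2, 3)):
--             filtered_points.append((x, y))
--         seen.add((x, y))
--     return filtered_points
-- ===== Notes on version B (the rewrite author's own statement) =====
-- stated objective: faster
-- what changed: Replaces A's quadratic rescan of all earlier points with a single pass that keeps a set of seen coordinates and probes the 25 neighbouring cells (Chebyshev radius 2) per point.
import Mathlib
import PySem

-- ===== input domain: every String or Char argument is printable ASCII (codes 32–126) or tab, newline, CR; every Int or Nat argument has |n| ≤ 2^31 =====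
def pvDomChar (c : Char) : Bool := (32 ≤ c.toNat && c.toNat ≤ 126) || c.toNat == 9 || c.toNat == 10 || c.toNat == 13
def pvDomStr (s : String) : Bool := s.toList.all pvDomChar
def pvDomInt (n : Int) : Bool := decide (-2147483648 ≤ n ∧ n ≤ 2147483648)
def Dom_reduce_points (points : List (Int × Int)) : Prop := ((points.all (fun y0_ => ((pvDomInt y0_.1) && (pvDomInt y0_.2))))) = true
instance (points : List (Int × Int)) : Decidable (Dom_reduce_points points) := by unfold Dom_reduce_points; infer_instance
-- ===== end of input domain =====

-- B keeps a set of earlier coordinates and probes the 25 neighbouring cells per point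
-- (O(n) expected) instead of A's rescan of the whole prefix (O(n^2)); same return value.

-- ===== PORT A =====
-- inner loop 'for j in range(i): if |dx|<=2 and |dy|<=2: flag; break' over the prefix of earlier points
def reduce_points_nearA (p q : Int × Int) : Bool :=
  decide ((p.1 - q.1).natAbs ≤ 2) && decide ((p.2 - q.2).natAbs ≤ 2)

-- outer loop: walks the list keeping the prefix of earlier points and the appended output
def reduce_points_go : List (Int × Int) → List (Int × Int) → List (Int × Int) → List (Int × Int)
  | [], _, acc => acc
  | p :: rest, prev, acc =>
      reduce_points_go rest (prev ++ [p])
        (if prev.any (reduce_points_nearA p) then acc else acc ++ [p])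

def reduce_points (points : List (Int × Int)) : List (Int × Int) :=
  reduce_points_go points [] []

-- ===== PORT B =====
-- any((x+dx, y+dy) in seen for dx in range(-2,3) for dy in range(-2,3))
def reduce_points_nearB (seen : PySem.Set (Int × Int)) (x y : Int) : Bool :=
  (PySem.List.pyRange (-2) 3 1).any (fun dx =>
    (PySem.List.pyRange (-2) 3 1).any (fun dy =>
      PySem.Set.contains seen (x + dx, y + dy)))

-- main loop: appends to the output unless a neighbour was seen, then records the point
def reduce_points_alt_go : List (Int × Int) → PySem.Set (Int × Int) → List (Int × Int) → List (Int × Int)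
  | [], _, acc => acc
  | (x, y) :: rest, seen, acc =>
      reduce_points_alt_go rest (PySem.Set.add seen (x, y))
        (if reduce_points_nearB seen x y then acc else acc ++ [(x, y)])

def reduce_points_alt (points : List (Int × Int)) : List (Int × Int) :=
  reduce_points_alt_go points PySem.Set.empty []

-- ===== PRECONDITION & SPEC =====
def Spec_reduce_points (points : List (Int × Int)) (out : List (Int × Int)) : Prop := out = reduce_points_alt points
instance (points : List (Int × Int)) (out : List (Int × Int)) : Decidable (Spec_reduce_points points out) := by unfold Spec_reduce_points; infer_instance

-- ===== CLAIM (what is proved, stated in full; the proofs are below) =====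
def Claim_equal_reduce_points : Prop := ∀ (points : List (Int × Int)), Dom_reduce_points points → Spec_reduce_points points (reduce_points points)

-- ===== LEMMAS AND PROOFS =====

-- the 25-cell probe against a set with the same members as the prefix equals A's prefix scan
theorem nearB_eq_anyA (prev : List (Int × Int)) (seen : PySem.Set (Int × Int))
    (h : ∀ q, q ∈ seen ↔ q ∈ prev) (x y : Int) :
    reduce_points_nearB seen x y = prev.any (reduce_points_nearA (x, y)) := by
  rw [Bool.eq_iff_iff]
  simp only [reduce_points_nearB, reduce_points_nearA,
    List.any_eq_true, PySem.List.mem_pyRange_one, PySem.Set.contains_iff, h,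
    decide_eq_true_eq, Bool.and_eq_true]
  constructor
  · rintro ⟨dx, hdx, dy, hdy, hq⟩
    exact ⟨(x + dx, y + dy), hq, by simp; omega, by simp; omega⟩
  · rintro ⟨⟨a, b⟩, hq, h1, h2⟩
    refine ⟨a - x, by simp at h1 ⊢; omega, b - y, by simp at h2 ⊢; omega, by simpa using hq⟩

theorem go_eq (rest prev acc : List (Int × Int)) (seen : PySem.Set (Int × Int))
    (h : ∀ q, q ∈ seen ↔ q ∈ prev) :
    reduce_points_go rest prev acc = reduce_points_alt_go rest seen acc := by
  induction rest generalizing prev seen acc with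
  | nil => rfl
  | cons p rest ih =>
    obtain ⟨x, y⟩ := p
    simp only [reduce_points_go, reduce_points_alt_go]
    rw [nearB_eq_anyA prev seen h]
    exact ih (prev ++ [(x, y)]) _ (PySem.Set.add seen (x, y)) (fun q => by
      rw [PySem.Set.mem_add]; simp [h q, or_comm])

-- ===== VERDICT (by name: the statement is the Claim_ definition above) =====
theorem reduce_points_spec : Claim_equal_reduce_points := by
  intro points _
  unfold Spec_reduce_points reduce_points reduce_points_alt
  exact go_eq points [] [] PySem.Set.empty (by simp [PySem.Set.empty])
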